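-- pv_equiv track=rewrite | github.com/Riteshkadiann/SkillVector | backend/core/skill_gap_engine.py | _dedup_skills
-- ===== SOURCE A (Python) =====
-- from typing import List, Dict
--
-- def _dedup_skills(skills: List[str]) -> List[str]:
--     """
--     Remove skills that are a word-for-word prefix/subset of a longer skill.
--     e.g. "version control" gets dropped when "version control systems" exists.
--     Keeps the most specific (longest) version of overlapping skills.
--     """
--     lower = [s.lower().strip() for s in skills]
--     keep = []
--     for i, s in enumerate(lower):
--         # Drop if any OTHER skill starts with this one and is longer
--         shadowed = any(
--             other.startswith(s) and other != s
--             for j, other in enumerate(lower) if i != j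
--         )
--         if not shadowed:
--             keep.append(skills[i])
--     return keep
-- ===== SOURCE B (Python) =====
-- from typing import List
--
-- def _dedup_skills(skills: List[str]) -> List[str]:
--     """
--     Same result as A, but O(n log n * L): after sorting the distinct
--     normalised skills, a skill is shadowed iff its immediate successor
--     in sorted order starts with it.
--     """
--     lower = [s.lower().strip() for s in skills]
--     srt = sorted(set(lower))
--     shadowed = {a for a, b in zip(srt, srt[1:]) if b.startswith(a)}
--     return [orig for orig, s in zip(skills, lower) if s not in shadowed]
-- ===== Notes on version B (the rewrite author's own statement) =====
-- stated objective: faster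
-- what changed: Replaces the quadratic all-pairs prefix scan with sort-the-distinct-normalised-skills and a single adjacent-pair pass: a skill is shadowed iff its sorted successor starts with it; the original list is then filtered in one pass against that set.
import Mathlib
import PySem

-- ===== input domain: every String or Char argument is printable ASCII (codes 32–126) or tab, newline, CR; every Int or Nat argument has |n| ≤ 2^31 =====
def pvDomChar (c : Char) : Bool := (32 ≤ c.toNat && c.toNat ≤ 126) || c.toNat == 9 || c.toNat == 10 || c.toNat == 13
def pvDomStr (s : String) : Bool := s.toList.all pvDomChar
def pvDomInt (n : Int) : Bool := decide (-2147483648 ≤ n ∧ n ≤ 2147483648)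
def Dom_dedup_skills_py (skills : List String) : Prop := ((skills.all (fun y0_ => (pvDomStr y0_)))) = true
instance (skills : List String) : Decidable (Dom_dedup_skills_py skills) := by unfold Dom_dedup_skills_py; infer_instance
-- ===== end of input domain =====

-- B replaces A's quadratic all-pairs prefix scan by sorting the distinct normalised
-- skills and testing only adjacent pairs (a skill is shadowed iff its sorted
-- successor starts with it); objective: faster (asymptotic).


-- ===== PORT A =====
def dedup_skills_py (skills : List String) : List String :=
  let lower := skills.map (fun s => PySem.Str.strip (PySem.Str.lower s))
  (PySem.List.enumerate lower).foldl
    (fun keep is =>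
      let shadowed := (PySem.List.enumerate lower).any (fun jo =>
        if is.1 ≠ jo.1 then PySem.Str.startswith jo.2 is.2 && decide (jo.2 ≠ is.2)
        else false)
      if !shadowed then keep ++ [PySem.List.pyGetD skills is.1 ""] else keep)
    []

-- ===== PORT B =====
def dedup_skills_py_alt (skills : List String) : List String :=
  let lower := skills.map (fun s => PySem.Str.strip (PySem.Str.lower s))
  let srt := PySem.List.sorted (PySem.Set.ofList lower) (fun x => x)
  let shadowed := PySem.Set.ofList
    (((srt.zip (PySem.List.slice srt (some 1) none)).filter
        (fun ab => PySem.Str.startswith ab.2 ab.1)).map (fun ab => ab.1))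
  ((skills.zip lower).filter (fun p => !(shadowed.contains p.2))).map (fun p => p.1)

-- ===== PRECONDITION & SPEC =====
def Spec_dedup_skills_py (skills : List String) (out : List String) : Prop := out = dedup_skills_py_alt skills
instance (skills : List String) (out : List String) : Decidable (Spec_dedup_skills_py skills out) := by unfold Spec_dedup_skills_py; infer_instance

-- ===== CLAIM (what is proved, stated in full; the proofs are below) =====
def Claim_equal_dedup_skills_py : Prop := ∀ (skills : List String), Dom_dedup_skills_py skills → Spec_dedup_skills_py skills (dedup_skills_py skills)

-- ===== LEMMAS AND PROOFS =====

-- easy ones first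
theorem pv_zip_filter_map {α : Type} (r : α → Bool) (f : α → α) :
    ∀ (xs : List α),
      ((xs.zip (xs.map f)).filter (fun p => r p.2)).map (fun p => p.1)
      = xs.filter (fun x => r (f x)) := by
  intro xs
  induction xs with
  | nil => rfl
  | cons x xs ih =>
    simp only [List.map_cons, List.zip_cons_cons, List.filter_cons]
    by_cases h : r (f x) = true
    · simp [h, ih]
    · simp [h, ih]

theorem pv_mem_enumerate {α : Type} (xs : List α) (n j : Int) (t : α) :
    (j, t) ∈ PySem.List.enumerate xs n ↔ ∃ k : Nat, ∃ h : k < xs.length, j = n + k ∧ xs[k] = t := by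
  induction xs generalizing n with
  | nil => simp [PySem.List.enumerate]
  | cons x xs ih =>
    rw [PySem.List.enumerate_cons]
    simp only [List.mem_cons, ih, Prod.mk.injEq]
    constructor
    · rintro (⟨rfl, rfl⟩ | ⟨k, hk, rfl, rfl⟩)
      · exact ⟨0, by simp, by simp⟩
      · exact ⟨k + 1, by simpa using hk, by push_cast; ring_nf, by simp⟩
    · rintro ⟨k, hk, rfl, rfl⟩
      cases k with
      | zero => exact Or.inl ⟨by simp, by simp⟩
      | succ k => exact Or.inr ⟨k, by simpa using hk, by push_cast; ring_nf, by simp⟩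

theorem pv_lt_of_prefix_ne : ∀ {s t : List Char}, s <+: t → s ≠ t → s < t := by
  intro s
  induction s with
  | nil =>
    intro t _ hne
    cases t with
    | nil => exact absurd rfl hne
    | cons b u => exact List.nil_lt_cons b u
  | cons a s ih =>
    intro t h hne
    obtain ⟨r, rfl⟩ := h
    rw [List.cons_append] at hne ⊢
    refine List.cons_lt_cons_iff.mpr (Or.inr ⟨rfl, ih (List.prefix_append s r) ?_⟩)
    intro he
    exact hne (by rw [← he])

theorem pv_prefix_of_le_le : ∀ {s u t : List Char}, s <+: t → s ≤ u → u ≤ t → s <+: u := by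
  intro s
  induction s with
  | nil => intro u t _ _ _; exact List.nil_prefix
  | cons a s ih =>
    intro u t h h1 h2
    obtain ⟨r, rfl⟩ := h
    cases u with
    | nil => exact absurd (List.nil_lt_cons a s) (not_lt.mpr h1)
    | cons b u =>
      rcases lt_trichotomy a b with hab | rfl | hba
      · rw [List.cons_append] at h2
        exact absurd (List.cons_lt_cons_iff.mpr (Or.inl hab)) (not_lt.mpr h2)
      · have hsu : s ≤ u := by
          rw [← not_lt]; intro hlt
          exact not_lt.mpr h1 (List.cons_lt_cons_iff.mpr (Or.inr ⟨rfl, hlt⟩))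
        have hut : u ≤ s ++ r := by
          rw [← not_lt]; intro hlt
          rw [List.cons_append] at h2
          exact not_lt.mpr h2 (List.cons_lt_cons_iff.mpr (Or.inr ⟨rfl, hlt⟩))
        exact List.cons_prefix_cons.mpr ⟨rfl, ih (List.prefix_append s r) hsu hut⟩
      · exact absurd (List.cons_lt_cons_iff.mpr (Or.inl hba)) (not_lt.mpr h1)

theorem pv_enum_filter_map {α : Type} [Inhabited α] (q : α → Bool) (f : α → α) (d : α) :
    ∀ (rest pre : List α),
      (((PySem.List.enumerate (rest.map f) pre.length).filter (fun is => q is.2)).map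
        (fun is => PySem.List.pyGetD (pre ++ rest) is.1 d))
      = rest.filter (fun x => q (f x)) := by
  intro rest
  induction rest with
  | nil => intro pre; simp
  | cons x rest ih =>
    intro pre
    rw [List.map_cons, PySem.List.enumerate_cons]
    have hget : PySem.List.pyGetD (pre ++ x :: rest) (pre.length : Int) d = x := by
      rw [PySem.List.pyGetD_natCast]
      simp [List.getD]
    have hstep : ((pre.length : Int) + 1) = (((pre ++ [x]).length : Nat) : Int) := by
      simp
    have happ : pre ++ x :: rest = (pre ++ [x]) ++ rest := by simp
    rw [List.filter_cons]
    by_cases h : q (f x) = true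
    · simp only [h, if_pos]
      rw [List.map_cons, hget, hstep, happ, ih (pre ++ [x])]
      simp [h]
    · rw [if_neg h, hstep, happ, ih (pre ++ [x])]
      simp [h]

theorem pv_any_enum (L : List String) (i : Int) (s : String)
    (hmem : (i, s) ∈ PySem.List.enumerate L 0) :
    ((PySem.List.enumerate L).any (fun jo =>
        if i ≠ jo.1 then PySem.Str.startswith jo.2 s && decide (jo.2 ≠ s) else false))
      = (L.any (fun t => PySem.Str.startswith t s && decide (t ≠ s))) := by
  obtain ⟨ki, hki, hie, hse⟩ := (pv_mem_enumerate L 0 i s).mp hmem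
  rw [Bool.eq_iff_iff]
  simp only [List.any_eq_true]
  constructor
  · rintro ⟨⟨j, o⟩, hjo, hcond⟩
    obtain ⟨k, hk, rfl, rfl⟩ := (pv_mem_enumerate L 0 _ _).mp hjo
    by_cases hij : i ≠ (0 + (k : Int))
    · rw [if_pos hij] at hcond
      exact ⟨L[k], List.getElem_mem hk, hcond⟩
    · rw [if_neg hij] at hcond
      exact absurd hcond (by simp)
  · rintro ⟨t, ht, hcond⟩
    obtain ⟨k, hk, rfl⟩ := List.mem_iff_getElem.mp ht
    refine ⟨((0 : Int) + (k : Int), L[k]), (pv_mem_enumerate L 0 _ _).mpr ⟨k, hk, rfl, rfl⟩, ?_⟩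
    have hne : i ≠ (0 : Int) + (k : Int) := by
      intro he
      have : k = ki := by omega
      subst this
      have : L[k] = s := hse
      simp [this] at hcond
    rw [if_pos hne]
    exact hcond

theorem pv_shadow_eq (L : List String) (s : String) (hs : s ∈ L) :
    (L.any (fun t => PySem.Str.startswith t s && decide (t ≠ s)))
      = ((PySem.Set.ofList
          ((((PySem.List.sorted (PySem.Set.ofList L) (fun x => x)).zip
              (PySem.List.slice (PySem.List.sorted (PySem.Set.ofList L) (fun x => x)) (some 1) none)).filter
              (fun ab => PySem.Str.startswith ab.2 ab.1)).map (fun ab => ab.1))).contains s) := by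
  set srt := PySem.List.sorted (PySem.Set.ofList L) (fun x => x) with hsrt
  have hpw : srt.Pairwise (· < ·) := PySem.List.sorted_ofList_pairwise_lt L
  have hmemsrt : ∀ x : String, x ∈ srt ↔ x ∈ L := fun x => by
    rw [hsrt, PySem.List.mem_sorted, PySem.Set.mem_ofList]
  rw [PySem.List.slice_from_one]
  apply Bool.eq_iff_iff.mpr
  rw [PySem.Set.contains_iff, PySem.Set.mem_ofList, List.any_eq_true]
  simp only [List.mem_map, List.mem_filter, Bool.and_eq_true, decide_eq_true_eq]
  constructor
  · rintro ⟨t, htL, hsw, hne⟩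
    have hpre : s.toList <+: t.toList := by
      rw [PySem.Str.startswith_eq] at hsw
      exact (PySem.Chars.startswith_iff _ _).mp hsw
    have hlt : s < t := String.lt_iff_toList_lt.mpr
      (pv_lt_of_prefix_ne hpre (fun he => hne (String.toList_inj.mp he.symm)))
    obtain ⟨p, hp, hsp⟩ := List.mem_iff_getElem.mp ((hmemsrt s).mpr hs)
    obtain ⟨q, hq, htq⟩ := List.mem_iff_getElem.mp ((hmemsrt t).mpr htL)
    have hpq : p < q := by
      rcases lt_trichotomy p q with h | rfl | h
      · exact h
      · exact absurd (hsp.symm.trans htq).symm hne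
      · exact absurd (hsp ▸ htq ▸ (List.pairwise_iff_getElem.mp hpw q p hq hp h)) (lt_asymm hlt)
    have hp1 : p + 1 < srt.length := by omega
    have hsb : s < srt[p + 1] := hsp ▸ List.pairwise_iff_getElem.mp hpw p (p + 1) hp hp1 (by omega)
    have hbt : srt[p + 1] ≤ t := by
      rcases eq_or_lt_of_le (show p + 1 ≤ q by omega) with h | h
      · exact le_of_eq (by simp_rw [h, htq])
      · exact le_of_lt (htq ▸ List.pairwise_iff_getElem.mp hpw (p + 1) q hp1 hq h)
    have hpre2 : s.toList <+: (srt[p + 1]).toList :=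
      pv_prefix_of_le_le hpre (String.le_iff_toList_le.mp (le_of_lt hsb))
        (String.le_iff_toList_le.mp hbt)
    have hplt : p < (srt.zip srt.tail).length := by
      rw [List.length_zip, List.length_tail]; omega
    refine ⟨(s, srt[p + 1]), ?_, rfl⟩
    refine ⟨List.mem_iff_getElem.mpr ⟨p, hplt, ?_⟩, ?_⟩
    · rw [List.getElem_zip, List.getElem_tail, hsp]
    · rw [PySem.Str.startswith_eq]
      exact (PySem.Chars.startswith_iff _ _).mpr hpre2
  · rintro ⟨ab, ⟨hab, hsw⟩, hfst⟩
    obtain ⟨p, hp, hzp⟩ := List.mem_iff_getElem.mp hab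
    have hp1 : p + 1 < srt.length := by
      rw [List.length_zip, List.length_tail] at hp; omega
    have habeq : ab = (srt[p], srt[p + 1]) := by
      rw [← hzp, List.getElem_zip, List.getElem_tail]
    have hsps : srt[p] = s := by rw [← hfst, habeq]
    have hlt : s < srt[p + 1] := hsps ▸ List.pairwise_iff_getElem.mp hpw p (p + 1)
      (by omega) hp1 (by omega)
    refine ⟨srt[p + 1], (hmemsrt _).mp (List.getElem_mem hp1), ?_, ne_of_gt hlt⟩
    have : ab.2 = srt[p + 1] := by rw [habeq]
    rw [this, hfst] at hsw
    exact hsw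

theorem pv_main (skills : List String) :
    dedup_skills_py skills = dedup_skills_py_alt skills := by
  unfold dedup_skills_py dedup_skills_py_alt
  simp only []
  rw [PySem.List.foldl_append_if, List.nil_append,
    pv_zip_filter_map
      (fun t => !((PySem.Set.ofList
        ((((PySem.List.sorted (PySem.Set.ofList (skills.map (fun s => PySem.Str.strip (PySem.Str.lower s)))) (fun x => x)).zip
            (PySem.List.slice (PySem.List.sorted (PySem.Set.ofList (skills.map (fun s => PySem.Str.strip (PySem.Str.lower s)))) (fun x => x)) (some 1) none)).filter
            (fun ab => PySem.Str.startswith ab.2 ab.1)).map (fun ab => ab.1))).contains t))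
      (fun s => PySem.Str.strip (PySem.Str.lower s)) skills]
  rw [List.filter_congr (l := PySem.List.enumerate (skills.map (fun s => PySem.Str.strip (PySem.Str.lower s))))
    (q := fun is => !((skills.map (fun s => PySem.Str.strip (PySem.Str.lower s))).any
      (fun t => PySem.Str.startswith t is.2 && decide (t ≠ is.2))))
    (fun is h => by
      obtain ⟨i, sv⟩ := is
      exact congrArg (fun b => !b) (pv_any_enum _ i sv h))]
  have hE := pv_enum_filter_map
    (q := fun sv => !((skills.map (fun s => PySem.Str.strip (PySem.Str.lower s))).any
      (fun t => PySem.Str.startswith t sv && decide (t ≠ sv))))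
    (f := fun s => PySem.Str.strip (PySem.Str.lower s)) "" skills []
  simp only [List.length_nil, Nat.cast_zero, List.nil_append] at hE
  rw [hE]
  refine List.filter_congr (fun x hx => ?_)
  exact congrArg (fun b => !b)
    (pv_shadow_eq _ _ (List.mem_map_of_mem hx))

-- ===== VERDICT (by name: the statement is the Claim_ definition above) =====
theorem dedup_skills_py_spec : Claim_equal_dedup_skills_py := by
  intro skills _
  exact pv_main skills
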